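-- pv_equiv track=rewrite | github.com/dzarmola/knot_pull | knot_pull/unentangler.py | new_cell
-- ===== SOURCE A (Python) =====
-- def neigh(i, j, n):
--     ns = []
--     for x, y in [(i - 1, j), (i - 1, j + 1), (i, j + 1)]:
--         if x >= 0 and y >= 0 and x < n and y < n and not (x == i and y == j):
--             ns.append((x, y))
--     return ns
--
-- def new_cell(out, i, j):
--     ns = neigh(i, j, len(out))
--     d = {}
--     for x, y in ns:
--         d[out[x][y]] = d.get(out[x][y], 0) + 1
--     d[0] = 0
--     new = sorted(d.items(), key=lambda _: _[1], reverse=True)[0]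
--     new = new[0] if new[1] == 3 else out[i][j]  # new[1]>=4
--     return new
-- ===== SOURCE B (Python) =====
-- def neigh(i, j, n):
--     cand = [(i - 1, j), (i - 1, j + 1), (i, j + 1)]
--     return [(x, y) for (x, y) in cand
--             if 0 <= x < n and 0 <= y < n and (x, y) != (i, j)]
--
-- def new_cell(out, i, j):
--     vals = [out[x][y] for (x, y) in neigh(i, j, len(out))]
--     if len(vals) == 3 and vals[0] == vals[1] == vals[2] and vals[0] != 0:
--         return vals[0]
--     return out[i][j]
-- ===== Notes on version B (the rewrite author's own statement) =====
-- stated objective: simpler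
-- what changed: B drops A's count-dict, the d[0]=0 trick and the sorted-by-count argmax, and instead returns the first neighbor value exactly when there are three neighbors, all equal and nonzero, falling back to out[i][j] otherwise.
import Mathlib
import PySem

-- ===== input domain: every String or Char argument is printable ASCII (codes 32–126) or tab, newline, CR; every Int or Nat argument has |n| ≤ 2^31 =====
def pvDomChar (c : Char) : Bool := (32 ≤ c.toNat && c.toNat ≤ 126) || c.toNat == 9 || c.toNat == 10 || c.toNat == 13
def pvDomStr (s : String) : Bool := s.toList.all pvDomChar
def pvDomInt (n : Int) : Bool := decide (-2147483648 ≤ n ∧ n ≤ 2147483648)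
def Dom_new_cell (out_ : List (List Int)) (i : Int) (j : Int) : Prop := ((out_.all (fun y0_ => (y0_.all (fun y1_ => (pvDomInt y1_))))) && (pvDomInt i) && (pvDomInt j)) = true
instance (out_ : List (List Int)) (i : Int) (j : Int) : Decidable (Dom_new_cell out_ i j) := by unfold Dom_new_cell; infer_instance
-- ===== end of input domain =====

-- B replaces A's count-dict + d[0]=0 + sorted-argmax with a direct "all three neighbors equal and nonzero" test (simpler).


-- ===== PORT A =====
-- out[x][y]; Pre_ guarantees both lookups are in range, so the defaults are never used
def pvAt (out_ : List (List Int)) (x y : Int) : Int :=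
  PySem.List.pyGetD (PySem.List.pyGetD out_ x []) y 0

def neigh (i j n : Int) : List (Int × Int) :=
  [(i - 1, j), (i - 1, j + 1), (i, j + 1)].foldl
    (fun ns p =>
      if 0 ≤ p.1 ∧ 0 ≤ p.2 ∧ p.1 < n ∧ p.2 < n ∧ ¬(p.1 = i ∧ p.2 = j)
      then ns ++ [p] else ns) []

def new_cell (out_ : List (List Int)) (i : Int) (j : Int) : Int :=
  let ns := neigh i j (out_.length : Int)
  let d := ns.foldl (fun d p => d.modify (pvAt out_ p.1 p.2) 0 (· + 1))
            (PySem.Dict.empty : PySem.Dict Int Int)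
  let d := d.insert 0 0
  -- d always contains key 0, so Python's [0] never raises; headD's default is dead
  let new := (PySem.List.sorted d.items (fun q => q.2) true).headD (0, 0)
  if new.2 = 3 then new.1 else pvAt out_ i j

-- ===== PORT B =====
def neigh_alt (i j n : Int) : List (Int × Int) :=
  [(i - 1, j), (i - 1, j + 1), (i, j + 1)].filter
    (fun p => decide (0 ≤ p.1 ∧ 0 ≤ p.2 ∧ p.1 < n ∧ p.2 < n ∧ ¬(p.1 = i ∧ p.2 = j)))

def new_cell_alt (out_ : List (List Int)) (i : Int) (j : Int) : Int :=
  let vals := (neigh_alt i j (out_.length : Int)).map (fun p => pvAt out_ p.1 p.2)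
  match vals with
  | [a, b, c] => if a = b ∧ b = c ∧ a ≠ 0 then a else pvAt out_ i j
  | _ => pvAt out_ i j

-- ===== PRECONDITION & SPEC =====
def pvAt? (out_ : List (List Int)) (x y : Int) : Option Int :=
  (PySem.List.pyGet? out_ x).bind (fun r => PySem.List.pyGet? r y)

-- Pre_ excludes exactly the inputs where Python A raises IndexError: out[i][j] out of
-- range, or an in-bounds-looking neighbor (x,y) (0 ≤ x,y < len(out), (x,y) ≠ (i,j))
-- whose row x is shorter than y+1 (ragged rows).
def Pre_new_cell (out_ : List (List Int)) (i : Int) (j : Int) : Prop :=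
  (pvAt? out_ i j).isSome = true ∧
  ∀ p ∈ ([(i - 1, j), (i - 1, j + 1), (i, j + 1)] : List (Int × Int)),
    (0 ≤ p.1 ∧ 0 ≤ p.2 ∧ p.1 < (out_.length : Int) ∧ p.2 < (out_.length : Int) ∧ ¬(p.1 = i ∧ p.2 = j)) →
    (pvAt? out_ p.1 p.2).isSome = true
instance (out_ : List (List Int)) (i : Int) (j : Int) : Decidable (Pre_new_cell out_ i j) := by
  unfold Pre_new_cell; infer_instance

def pvWitness_new_cell : List (List Int) × Int × Int := ([[1, 1], [1, 0]], 1, 0)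

def Spec_new_cell (out_ : List (List Int)) (i : Int) (j : Int) (out : Int) : Prop := out = new_cell_alt out_ i j
instance (out_ : List (List Int)) (i : Int) (j : Int) (out : Int) : Decidable (Spec_new_cell out_ i j out) := by unfold Spec_new_cell; infer_instance

-- ===== CLAIM (what is proved, stated in full; the proofs are below) =====
def Claim_equal_new_cell : Prop := ∀ (out_ : List (List Int)) (i : Int) (j : Int), Dom_new_cell out_ i j → Pre_new_cell out_ i j → Spec_new_cell out_ i j (new_cell out_ i j)

-- ===== LEMMAS AND PROOFS =====

-- A's pipeline on the list of neighbor VALUES (count-dict, d[0]=0, sorted-argmax)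
def Aout (L : List Int) (cur : Int) : Int :=
  let d := (L.foldl (fun d v => d.modify v 0 (· + 1)) (PySem.Dict.empty : PySem.Dict Int Int)).insert 0 0
  let hd := (PySem.List.sorted d.items (fun q => q.2) true).headD (0, 0)
  if hd.2 = 3 then hd.1 else cur

theorem mem_headD_sorted {I : List (Int × Int)} (h : I ≠ []) :
    ((PySem.List.sorted I (fun q => q.2) true).headD (0, 0)) ∈ I := by
  have hp := PySem.List.sorted_perm I (fun q => q.2) true
  cases hs : PySem.List.sorted I (fun q => q.2) true with
  | nil => rw [hs] at hp; exact absurd hp.nil_eq.symm h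
  | cons x t => exact hp.subset (by rw [hs]; simp)

theorem insert_items_ne_nil (d : PySem.Dict Int Int) (k v : Int) :
    (d.insert k v).items ≠ [] := by
  by_cases hc : d.contains k
  · have hne : d.items ≠ [] := by
      intro h; rw [PySem.Dict.contains, h] at hc; simp_all
    simp [PySem.Dict.insert, hc, hne]
  · simp [PySem.Dict.insert, hc]

theorem Aout_eq_cur (L : List Int) (cur : Int)
    (hI : ∀ p ∈ ((L.foldl (fun d v => d.modify v 0 (· + 1)) (PySem.Dict.empty : PySem.Dict Int Int)).insert 0 0).items, p.2 ≠ 3) :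
    Aout L cur = cur := by
  unfold Aout
  rw [if_neg (hI _ (mem_headD_sorted (insert_items_ne_nil _ 0 0)))]

theorem pvEqSwap (x y : Int) : (x = y) = (y = x) := propext ⟨fun h => h.symm, fun h => h.symm⟩

theorem Aout_nil (cur : Int) : Aout [] cur = cur := by
  apply Aout_eq_cur
  simp [PySem.Dict.empty, PySem.Dict.insert, PySem.Dict.contains]

theorem Aout_one (a cur : Int) : Aout [a] cur = cur := by
  apply Aout_eq_cur
  by_cases ha : a = 0
  · subst a
    simp [PySem.Dict.empty, PySem.Dict.modify, PySem.Dict.insert, PySem.Dict.contains,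
      PySem.Dict.getD, PySem.Dict.get?]
  · simp [PySem.Dict.empty, PySem.Dict.modify, PySem.Dict.insert, PySem.Dict.contains,
      PySem.Dict.getD, PySem.Dict.get?, ha, pvEqSwap 0 a]

theorem Aout_two (a b cur : Int) : Aout [a, b] cur = cur := by
  apply Aout_eq_cur
  by_cases hab : b = a
  · subst b
    by_cases ha : a = 0
    · subst a
      simp [PySem.Dict.empty, PySem.Dict.modify, PySem.Dict.insert, PySem.Dict.contains,
        PySem.Dict.getD, PySem.Dict.get?]
    · simp [PySem.Dict.empty, PySem.Dict.modify, PySem.Dict.insert, PySem.Dict.contains,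
        PySem.Dict.getD, PySem.Dict.get?, ha, pvEqSwap 0 a]
  · by_cases ha : a = 0 <;> by_cases hb : b = 0
    · exact absurd (show b = a by omega) hab
    all_goals
      simp [PySem.Dict.empty, PySem.Dict.modify, PySem.Dict.insert, PySem.Dict.contains,
        PySem.Dict.getD, PySem.Dict.get?, ha, hb, hab, pvEqSwap a b,
        pvEqSwap 0 a, pvEqSwap 0 b]

set_option maxHeartbeats 1000000 in
theorem Aout_three (a b c cur : Int) :
    Aout [a, b, c] cur = if a = b ∧ b = c ∧ a ≠ 0 then a else cur := by
  by_cases hab : b = a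
  · subst b
    by_cases hca : c = a
    · subst c
      by_cases ha : a = 0
      · subst a
        rw [if_neg (by simp)]
        apply Aout_eq_cur
        simp [PySem.Dict.empty, PySem.Dict.modify, PySem.Dict.insert, PySem.Dict.contains,
          PySem.Dict.getD, PySem.Dict.get?]
      · rw [if_pos ⟨rfl, rfl, ha⟩]
        simp [Aout, PySem.Dict.empty, PySem.Dict.modify, PySem.Dict.insert, PySem.Dict.contains,
          PySem.Dict.getD, PySem.Dict.get?, PySem.List.sorted, PySem.List.insertBy, ha, pvEqSwap 0 a]
    · rw [if_neg (by rintro ⟨-, h2, -⟩; exact hca h2.symm)]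
      apply Aout_eq_cur
      by_cases ha : a = 0 <;> by_cases hc : c = 0
      · exact absurd (show c = a by omega) hca
      all_goals
        simp [PySem.Dict.empty, PySem.Dict.modify, PySem.Dict.insert, PySem.Dict.contains,
          PySem.Dict.getD, PySem.Dict.get?, ha, hc, hca, pvEqSwap a c,
          pvEqSwap 0 a, pvEqSwap 0 c]
  · rw [if_neg (by rintro ⟨h1, -, -⟩; exact hab h1.symm)]
    apply Aout_eq_cur
    by_cases hca : c = a
    · subst c
      by_cases ha : a = 0 <;> by_cases hb : b = 0
      · exact absurd (show b = a by omega) hab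
      all_goals
        simp [PySem.Dict.empty, PySem.Dict.modify, PySem.Dict.insert, PySem.Dict.contains,
          PySem.Dict.getD, PySem.Dict.get?, ha, hb, hab, pvEqSwap a b,
          pvEqSwap 0 a, pvEqSwap 0 b]
    · by_cases hcb : c = b
      · subst c
        by_cases hb : b = 0 <;> by_cases ha : a = 0
        · exact absurd (show b = a by omega) hab
        all_goals
          simp [PySem.Dict.empty, PySem.Dict.modify, PySem.Dict.insert, PySem.Dict.contains,
            PySem.Dict.getD, PySem.Dict.get?, ha, hb, hab, pvEqSwap a b,
            pvEqSwap 0 a, pvEqSwap 0 b]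
      · by_cases ha : a = 0 <;> by_cases hb : b = 0 <;> by_cases hc : c = 0
        all_goals
          first
          | exact absurd (show b = a by omega) hab
          | exact absurd (show c = a by omega) hca
          | exact absurd (show c = b by omega) hcb
          | simp [PySem.Dict.empty, PySem.Dict.modify, PySem.Dict.insert, PySem.Dict.contains,
              PySem.Dict.getD, PySem.Dict.get?, ha, hb, hc, hab, hca, hcb,
              pvEqSwap a b, pvEqSwap a c, pvEqSwap b c, pvEqSwap 0 a, pvEqSwap 0 b, pvEqSwap 0 c]

theorem new_cell_eq_Aout (out_ : List (List Int)) (i j : Int) :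
    new_cell out_ i j =
      Aout ((neigh i j (out_.length : Int)).map (fun p => pvAt out_ p.1 p.2)) (pvAt out_ i j) := by
  unfold new_cell Aout
  rw [List.foldl_map]

theorem neigh_eq_alt (i j n : Int) : neigh i j n = neigh_alt i j n := by
  unfold neigh neigh_alt
  have hf : (fun (ns : List (Int × Int)) (p : Int × Int) =>
        if 0 ≤ p.1 ∧ 0 ≤ p.2 ∧ p.1 < n ∧ p.2 < n ∧ ¬(p.1 = i ∧ p.2 = j) then ns ++ [p] else ns)
      = (fun (ns : List (Int × Int)) (p : Int × Int) =>
        if (fun (q : Int × Int) => decide (0 ≤ q.1 ∧ 0 ≤ q.2 ∧ q.1 < n ∧ q.2 < n ∧ ¬(q.1 = i ∧ q.2 = j))) p = true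
        then ns ++ [(fun (q : Int × Int) => q) p] else ns) := by
    funext ns p
    by_cases h : 0 ≤ p.1 ∧ 0 ≤ p.2 ∧ p.1 < n ∧ p.2 < n ∧ ¬(p.1 = i ∧ p.2 = j)
    · rw [if_pos h, if_pos (by simp only [decide_eq_true_eq]; tauto)]
    · rw [if_neg h, if_neg (by simp only [decide_eq_true_eq]; tauto)]
  rw [hf, PySem.List.foldl_append_if]
  simp

theorem neigh_alt_len (i j n : Int) : (neigh_alt i j n).length ≤ 3 := by
  unfold neigh_alt
  exact List.length_filter_le _ _

-- ===== VERDICT (by name: the statement is the Claim_ definition above) =====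
theorem new_cell_spec : Claim_equal_new_cell := by
  intro out_ i j _ _
  unfold Spec_new_cell
  rw [new_cell_eq_Aout, neigh_eq_alt]
  unfold new_cell_alt
  cases h : (neigh_alt i j (out_.length : Int)).map (fun p => pvAt out_ p.1 p.2) with
  | nil => rw [Aout_nil]
  | cons a t =>
    cases t with
    | nil => rw [Aout_one]
    | cons b t2 =>
      cases t2 with
      | nil => rw [Aout_two]
      | cons c t3 =>
        cases t3 with
        | nil => rw [Aout_three]
        | cons d t4 =>
          exfalso
          have h3 : ((neigh_alt i j (out_.length : Int)).map (fun p => pvAt out_ p.1 p.2)).length ≤ 3 := by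
            rw [List.length_map]; exact neigh_alt_len i j (out_.length : Int)
          rw [h] at h3
          simp at h3
          omega
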